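-- pv_equiv track=rewrite | github.com/TinacciL/QueryAstroWoonDatabase | tmp/mol_lib.py | CorrectErrorPwdMolecules
-- ===== SOURCE A (Python) =====
-- def CorrectErrorPwdMolecules(item):
--     #item  = 'molecules/N1O2/N1O2_0.xtbopt.xyz'
--     tmp_bl = False
--     tmp_item = ''
--     tmp_a = ''
--     for j,item_j in enumerate(item):
--         if j > 9:
--             if item_j == '/':
--                 tmp_bl = True
--             if tmp_bl == True:
--                 tmp_item = tmp_item + item_j
--             else:
--                 tmp_a = tmp_a + item_j
--     tmp_bl = True
--     tmp_subf = ''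
--     for j,item_j in enumerate(tmp_item):
--         if item_j == '.':
--             tmp_bl = False
--         if tmp_bl == True:
--             tmp_subf = tmp_subf + item_j
--     tmp_path  = item[:10] + tmp_a + tmp_subf +  tmp_item
--     return(tmp_path)
-- ===== SOURCE B (Python) =====
-- def CorrectErrorPwdMolecules(item):
--     # simpler: delimiter-locating slices via str.partition instead of flag-driven char loops
--     prefix, rest = item[:10], item[10:]
--     head, sep, tail = rest.partition('/')
--     tmp_item = sep + tail
--     tmp_subf = tmp_item.partition('.')[0]
--     return prefix + head + tmp_subf + tmp_item
-- ===== Notes on version B (the rewrite author's own statement) =====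
-- stated objective: simpler
-- what changed: Replaces the two flag-driven character-accumulation loops with delimiter-locating slices: str.partition splits the tail at the first slash into directory and filename parts, and a second partition at the first dot extracts the subfolder name.
import Mathlib
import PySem

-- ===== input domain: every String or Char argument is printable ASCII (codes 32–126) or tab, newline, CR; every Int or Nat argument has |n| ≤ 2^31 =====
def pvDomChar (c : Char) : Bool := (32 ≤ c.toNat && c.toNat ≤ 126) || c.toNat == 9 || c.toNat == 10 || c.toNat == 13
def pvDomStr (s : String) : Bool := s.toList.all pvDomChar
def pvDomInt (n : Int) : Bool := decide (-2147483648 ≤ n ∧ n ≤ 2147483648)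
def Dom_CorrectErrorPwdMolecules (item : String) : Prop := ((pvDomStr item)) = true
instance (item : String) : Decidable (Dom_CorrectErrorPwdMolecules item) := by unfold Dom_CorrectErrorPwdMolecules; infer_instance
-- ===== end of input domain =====

-- B rebuilds the path by splitting at the first '/' and first '.' (partition-style slices)
-- instead of A's two flag-driven character-accumulation loops; return values proved equal on all inputs.

-- ===== PORT A =====
-- state: (tmp_bl, tmp_item, tmp_a) as in A's first loop; strings handled as List Char
def pvA_step1 (st : Bool × List Char × List Char) (jc : Int × Char) : Bool × List Char × List Char :=
  if jc.1 > 9 then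
    let bl := if jc.2 = '/' then true else st.1
    if bl = true then (bl, st.2.1 ++ [jc.2], st.2.2) else (bl, st.2.1, st.2.2 ++ [jc.2])
  else st

-- state: (tmp_bl, tmp_subf) as in A's second loop
def pvA_step2 (st : Bool × List Char) (jc : Int × Char) : Bool × List Char :=
  let bl := if jc.2 = '.' then false else st.1
  if bl = true then (bl, st.2 ++ [jc.2]) else (bl, st.2)

def CorrectErrorPwdMolecules (item : String) : String :=
  let s := item.toList
  let r1 := (PySem.List.enumerate s 0).foldl pvA_step1 (false, [], [])
  let tmp_item := r1.2.1
  let tmp_a := r1.2.2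
  let r2 := (PySem.List.enumerate tmp_item 0).foldl pvA_step2 (true, [])
  let tmp_subf := r2.2
  -- item[:10] with a nonnegative literal bound is exactly take 10
  String.ofList (s.take 10 ++ tmp_a ++ tmp_subf ++ tmp_item)

-- ===== PORT B =====
def CorrectErrorPwdMolecules_alt (item : String) : String :=
  let pre := item.toList.take 10
  let rest := item.toList.drop 10
  -- rest.partition('/'): head = chars before the first '/', tmp_item = sep + tail = the remainder
  let head := rest.takeWhile (· ≠ '/')
  let tmp_item := rest.dropWhile (· ≠ '/')
  -- tmp_item.partition('.')[0]
  let tmp_subf := tmp_item.takeWhile (· ≠ '.')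
  String.ofList (pre ++ head ++ tmp_subf ++ tmp_item)

-- ===== PRECONDITION & SPEC =====
def Spec_CorrectErrorPwdMolecules (item : String) (out : String) : Prop := out = CorrectErrorPwdMolecules_alt item
instance (item : String) (out : String) : Decidable (Spec_CorrectErrorPwdMolecules item out) := by unfold Spec_CorrectErrorPwdMolecules; infer_instance

-- ===== CLAIM (what is proved, stated in full; the proofs are below) =====
def Claim_equal_CorrectErrorPwdMolecules : Prop := ∀ (item : String), Dom_CorrectErrorPwdMolecules item → Spec_CorrectErrorPwdMolecules item (CorrectErrorPwdMolecules item)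

-- ===== LEMMAS AND PROOFS =====

-- indices all ≤ 9: the guarded fold does nothing
theorem pvA_fold1_low (l : List Char) (n : Int) (s : Bool × List Char × List Char)
    (h : n + l.length ≤ 10) :
    (PySem.List.enumerate l n).foldl pvA_step1 s = s := by
  induction l generalizing n s with
  | nil => simp [PySem.List.enumerate_nil]
  | cons c t ih =>
      simp only [PySem.List.enumerate_cons, List.foldl_cons]
      have hn : ¬ (n > 9) := by simp at h; omega
      rw [show pvA_step1 s (n, c) = s by simp [pvA_step1, hn]]
      exact ih _ _ (by simp at h ⊢; omega)

-- once the flag is true everything goes to tmp_item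
theorem pvA_fold1_true (l : List Char) (n : Int) (ti ta : List Char) (hn : 10 ≤ n) :
    (PySem.List.enumerate l n).foldl pvA_step1 (true, ti, ta) = (true, ti ++ l, ta) := by
  induction l generalizing n ti with
  | nil => simp [PySem.List.enumerate_nil]
  | cons c t ih =>
      simp only [PySem.List.enumerate_cons, List.foldl_cons]
      rw [show pvA_step1 (true, ti, ta) (n, c) = (true, ti ++ [c], ta) by
        simp [pvA_step1]; omega]
      rw [ih (n + 1) (ti ++ [c]) (by omega)]
      simp

-- indices all ≥ 10: the guard is always true; result characterised by takeWhile/dropWhile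
theorem pvA_fold1_high (l : List Char) (n : Int) (ti ta : List Char) (hn : 10 ≤ n) :
    (PySem.List.enumerate l n).foldl pvA_step1 (false, ti, ta)
      = (l.any (· = '/'), ti ++ l.dropWhile (· ≠ '/'), ta ++ l.takeWhile (· ≠ '/')) := by
  induction l generalizing n ti ta with
  | nil => simp [PySem.List.enumerate_nil]
  | cons c t ih =>
      simp only [PySem.List.enumerate_cons, List.foldl_cons]
      by_cases hc : c = '/'
      · rw [show pvA_step1 (false, ti, ta) (n, c) = (true, ti ++ [c], ta) by
          simp [pvA_step1, hc]; omega]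
        rw [pvA_fold1_true t (n + 1) (ti ++ [c]) ta (by omega)]
        simp [hc, List.dropWhile, List.takeWhile]
      · rw [show pvA_step1 (false, ti, ta) (n, c) = (false, ti, ta ++ [c]) by
          simp [pvA_step1, hc]; omega]
        rw [ih (n + 1) ti (ta ++ [c]) (by omega)]
        simp [hc, List.dropWhile, List.takeWhile]



theorem pvA_fold2_false (l : List Char) (n : Int) (sf : List Char) :
    (PySem.List.enumerate l n).foldl pvA_step2 (false, sf) = (false, sf) := by
  induction l generalizing n with
  | nil => simp [PySem.List.enumerate_nil]
  | cons c t ih =>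
      simp only [PySem.List.enumerate_cons, List.foldl_cons]
      rw [show pvA_step2 (false, sf) (n, c) = (false, sf) by simp [pvA_step2]]
      exact ih (n + 1)

theorem pvA_fold2 (l : List Char) (n : Int) (sf : List Char) :
    (PySem.List.enumerate l n).foldl pvA_step2 (true, sf)
      = ((l.all (· ≠ '.')), sf ++ l.takeWhile (· ≠ '.')) := by
  induction l generalizing n sf with
  | nil => simp [PySem.List.enumerate_nil]
  | cons c t ih =>
      simp only [PySem.List.enumerate_cons, List.foldl_cons]
      by_cases hc : c = '.'
      · rw [show pvA_step2 (true, sf) (n, c) = (false, sf) by simp [pvA_step2, hc]]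
        rw [pvA_fold2_false t (n + 1) sf]
        simp [hc, List.takeWhile]
      · rw [show pvA_step2 (true, sf) (n, c) = (true, sf ++ [c]) by simp [pvA_step2, hc]]
        rw [ih (n + 1) (sf ++ [c])]
        simp [hc, List.takeWhile]



-- ===== VERDICT (by name: the statement is the Claim_ definition above) =====
theorem CorrectErrorPwdMolecules_spec : Claim_equal_CorrectErrorPwdMolecules := by
  intro item _
  unfold Spec_CorrectErrorPwdMolecules CorrectErrorPwdMolecules CorrectErrorPwdMolecules_alt
  set s := item.toList with hs
  have hsplit : s = s.take 10 ++ s.drop 10 := (List.take_append_drop 10 s).symm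
  have h1 : (PySem.List.enumerate s 0).foldl pvA_step1 (false, [], [])
      = ((s.drop 10).any (· = '/'),
         (s.drop 10).dropWhile (· ≠ '/'),
         (s.drop 10).takeWhile (· ≠ '/')) := by
    by_cases h10 : 10 ≤ s.length
    · conv_lhs => rw [hsplit]
      rw [PySem.List.enumerate_append]
      rw [List.foldl_append]
      rw [pvA_fold1_low (s.take 10) 0 _ (by have := List.length_take_le 10 s; omega)]
      rw [pvA_fold1_high (s.drop 10) _ [] [] (by
        rw [List.length_take]; omega)]
      simp
    · have hd : s.drop 10 = [] := by rw [List.drop_eq_nil_iff]; omega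
      rw [pvA_fold1_low s 0 _ (by omega)]
      simp [hd]
  simp only [h1, pvA_fold2]
  simp
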